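-- pv_equiv track=rewrite | github.com/BrettGoreham/AdventOfCode2020 | day19/dayNineteen.py | read_content_into_rules_and_strings
-- ===== SOURCE A (Python) =====
-- from collections import defaultdict
--
-- def read_content_into_rules_and_strings(lines):
--     rules = defaultdict(list)
--     strings_to_attempt_to_match = []
--     rules_done = False
--     for line in lines:
--         if rules_done:
--             strings_to_attempt_to_match.append(line)
--         elif line == '':
--             rules_done = True
--         else:
--             rule_num, instructions = line.split(':')
--
--             for match in instructions.split('|'):
--                 rules[rule_num].append(match.strip().split(' '))
--
--     return rules, strings_to_attempt_to_match
-- ===== SOURCE B (Python) =====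
-- from collections import defaultdict
--
--
-- def read_content_into_rules_and_strings(lines):
--     try:
--         sep = lines.index('')
--     except ValueError:
--         sep = len(lines)
--     rules = defaultdict(list)
--     for line in lines[:sep]:
--         rule_num, instructions = line.split(':')
--         rules[rule_num].extend(m.strip().split(' ') for m in instructions.split('|'))
--     return rules, list(lines[sep + 1:])
-- ===== Notes on version B (the rewrite author's own statement) =====
-- stated objective: simpler
-- what changed: B replaces A's single stateful loop with a rules_done flag by locating the first blank line with lines.index(''), folding the rule slice with one extend of all '|'-alternatives per line, and taking the tail slice as the strings list.
import Mathlib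
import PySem

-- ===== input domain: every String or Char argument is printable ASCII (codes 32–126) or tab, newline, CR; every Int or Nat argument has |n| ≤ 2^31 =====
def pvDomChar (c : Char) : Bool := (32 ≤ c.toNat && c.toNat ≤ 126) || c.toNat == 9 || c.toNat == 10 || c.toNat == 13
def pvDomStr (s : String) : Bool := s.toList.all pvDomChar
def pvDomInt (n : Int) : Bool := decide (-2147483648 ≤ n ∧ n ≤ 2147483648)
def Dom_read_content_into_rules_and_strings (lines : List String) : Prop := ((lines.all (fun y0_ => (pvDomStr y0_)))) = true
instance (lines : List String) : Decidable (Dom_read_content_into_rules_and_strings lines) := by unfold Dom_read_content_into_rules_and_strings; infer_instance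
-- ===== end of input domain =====

-- B replaces A's one-pass boolean-flag loop by locating the first blank line and slicing: rules
-- from lines[:sep] (each line's alternatives added in one extend), strings = lines[sep+1:].
-- Same return value; objective: simpler decomposition, not speed.

-- ===== PORT A =====
-- s.split(sep) for a non-empty literal sep: split? is `some` whenever sep ≠ ""
def pvSplit (s sep : String) : List String := (PySem.Str.split? s sep).getD []
-- one flag-driven step of A's loop; state = (rules, strings_to_attempt_to_match, rules_done)
def pvStepA (st : PySem.Dict String (List (List String)) × List String × Bool) (line : String) :
    PySem.Dict String (List (List String)) × List String × Bool :=
  if st.2.2 then (st.1, st.2.1 ++ [line], st.2.2)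
  else if line = "" then (st.1, st.2.1, true)
  else match pvSplit line ":" with
    | [rule_num, instructions] =>
        ((pvSplit instructions "|").foldl
          (fun r m => r.modify rule_num [] (· ++ [pvSplit (PySem.Str.strip m) " "])) st.1,
         st.2.1, st.2.2)
    | _ => (st.1, st.2.1, st.2.2)   -- Python raises ValueError here (unpacking); excluded by Pre_

def read_content_into_rules_and_strings (lines : List String) :
    (List (String × List (List String))) × List String :=
  let st := lines.foldl pvStepA (PySem.Dict.empty, [], false)
  (st.1.items, st.2.1)

-- ===== PORT B =====
-- rules[rule_num].extend(m.strip().split(' ') for m in instructions.split('|'))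
def pvAddRule (r : PySem.Dict String (List (List String))) (line : String) :
    PySem.Dict String (List (List String)) :=
  match pvSplit line ":" with
  | [rule_num, instructions] =>
      r.modify rule_num []
        (· ++ (pvSplit instructions "|").map
            (fun m => pvSplit (PySem.Str.strip m) " "))
  | _ => r   -- Python raises ValueError here (unpacking); excluded by Pre_

def read_content_into_rules_and_strings_alt (lines : List String) :
    (List (String × List (List String))) × List String :=
  let sep : Nat := (PySem.List.index? lines "").getD lines.length
  (((PySem.List.slice lines none (some (sep : Int))).foldl pvAddRule PySem.Dict.empty).items,
   PySem.List.slice lines (some ((sep : Int) + 1)) none)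

-- ===== PRECONDITION & SPEC =====
-- Pre_ excludes inputs where Python A raises ValueError: a line before the first blank line
-- whose split(':') does not have exactly two parts (no ':' or more than one ':').
def Pre_read_content_into_rules_and_strings (lines : List String) : Prop :=
  ∀ l ∈ lines.takeWhile (fun s => s ≠ ""), (pvSplit l ":").length = 2
instance (lines : List String) : Decidable (Pre_read_content_into_rules_and_strings lines) := by
  unfold Pre_read_content_into_rules_and_strings; infer_instance

def pvWitness_read_content_into_rules_and_strings : List String :=
  ["0: 1 2 | 3 4", "1: \"a\"", "", "ab", ""]

def Spec_read_content_into_rules_and_strings (lines : List String) (out : (List (String × List (List String))) × List String) : Prop := out = read_content_into_rules_and_strings_alt lines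
instance (lines : List String) (out : (List (String × List (List String))) × List String) : Decidable (Spec_read_content_into_rules_and_strings lines out) := by unfold Spec_read_content_into_rules_and_strings; infer_instance

-- ===== CLAIM (what is proved, stated in full; the proofs are below) =====
def Claim_equal_read_content_into_rules_and_strings : Prop := ∀ (lines : List String), Dom_read_content_into_rules_and_strings lines → Pre_read_content_into_rules_and_strings lines → Spec_read_content_into_rules_and_strings lines (read_content_into_rules_and_strings lines)

-- ===== LEMMAS AND PROOFS =====

-- Python's s.split(sep) for sep != '' always yields at least one piece
theorem pvGo_ne_nil (sep : List Char) : ∀ (fuel : Nat) (l cur : List Char) (acc : List (List Char)),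
    PySem.Chars.splitOn.go sep fuel l cur acc ≠ [] := by
  intro fuel
  induction fuel with
  | zero => intro l cur acc; simp [PySem.Chars.splitOn.go]
  | succ n ih =>
      intro l cur acc
      cases l with
      | nil => simp [PySem.Chars.splitOn.go]
      | cons c rest =>
          rw [PySem.Chars.splitOn.go]
          split_ifs <;> apply ih

theorem pvSplit_ne_nil (s sep : String) (h : sep ≠ "") : pvSplit s sep ≠ [] := by
  have hsep : sep.toList ≠ [] := by simpa [String.toList_eq_nil_iff] using h
  simp [pvSplit, PySem.Str.split?, PySem.Chars.split?, List.isEmpty_iff, hsep, PySem.Chars.splitOn]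
  intro e
  exact pvGo_ne_nil _ _ _ _ _ (by simpa using congrArg (List.map String.ofList) e)

-- two appends to rules[k] via d[k] = d.get(k, []) + … compose
theorem pvModify_modify (r : PySem.Dict String (List (List String))) (k : String)
    (xs ys : List (List String)) :
    (r.modify k [] (· ++ xs)).modify k [] (· ++ ys) = r.modify k [] (· ++ (xs ++ ys)) := by
  show (r.insert k (r.getD k [] ++ xs)).insert k
      ((r.insert k (r.getD k [] ++ xs)).getD k [] ++ ys) = _
  rw [PySem.Dict.getD_insert_self, PySem.Dict.insert_insert_self, List.append_assoc]; rfl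

-- A's per-alternative appends to rules[k] collapse to B's single extend
theorem pvInnerLoop (k : String) (alts : List String) :
    ∀ (xs : List (List String)) (r : PySem.Dict String (List (List String))),
    alts.foldl (fun r m => r.modify k [] (· ++ [pvSplit (PySem.Str.strip m) " "]))
        (r.modify k [] (· ++ xs))
      = r.modify k []
          (· ++ (xs ++ alts.map (fun m => pvSplit (PySem.Str.strip m) " "))) := by
  induction alts with
  | nil => intro xs r; simp
  | cons m ms ih =>
      intro xs r
      rw [List.foldl_cons, pvModify_modify, ih]
      simp

-- one step of A's loop with the flag still False, in B's vocabulary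
theorem pvStepA_false (r : PySem.Dict String (List (List String))) (acc : List String)
    (line : String) :
    pvStepA (r, acc, false) line
      = if line = "" then (r, acc, true) else (pvAddRule r line, acc, false) := by
  by_cases hl : line = "" <;> simp only [pvStepA, pvAddRule, hl, Bool.false_eq_true, if_false, reduceIte]
  cases hsp : pvSplit line ":" with
  | nil => rfl
  | cons a t =>
      cases t with
      | nil => rfl
      | cons b t2 =>
          cases t2 with
          | cons c t3 => rfl
          | nil =>
              simp only
              cases halt : pvSplit b "|" with
              | nil => exact absurd halt (pvSplit_ne_nil b "|" (by decide))
              | cons m ms =>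
                  rw [List.foldl_cons]
                  show Prod.mk (ms.foldl _ ((r.modify a []
                    (· ++ [pvSplit (PySem.Str.strip m) " "])))) (acc, false) = _
                  have := pvInnerLoop a ms [pvSplit (PySem.Str.strip m) " "] r
                  rw [this]
                  simp

-- once rules_done is True, A only appends the remaining lines
theorem pvFoldA_done (ls : List String) (r : PySem.Dict String (List (List String)))
    (acc : List String) :
    ls.foldl pvStepA (r, acc, true) = (r, acc ++ ls, true) := by
  induction ls generalizing acc with
  | nil => simp
  | cons l ls ih => simp [List.foldl_cons, pvStepA, ih]

-- before any blank line, A's loop is B's rule loop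
theorem pvFoldA_rules (ls : List String) (h : "" ∉ ls)
    (r : PySem.Dict String (List (List String))) (acc : List String) :
    ls.foldl pvStepA (r, acc, false) = (ls.foldl pvAddRule r, acc, false) := by
  induction ls generalizing r with
  | nil => rfl
  | cons l ls ih =>
      have hl : l ≠ "" := fun e => h (e ▸ List.mem_cons_self ..)
      rw [List.foldl_cons, pvStepA_false, if_neg hl, List.foldl_cons,
        ih (fun e => h (List.mem_cons_of_mem _ e))]

-- split a list at its first occurrence of v
theorem pvFirstMem {α : Type} [DecidableEq α] (v : α) (l : List α) (h : v ∈ l) :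
    ∃ pre suf, l = pre ++ v :: suf ∧ v ∉ pre := by
  induction l with
  | nil => cases h
  | cons x xs ih =>
      by_cases hx : x = v
      · exact ⟨[], xs, by simp [hx], by simp⟩
      · obtain ⟨pre, suf, he, hn⟩ := ih (by
          cases List.mem_cons.mp h with
          | inl e => exact absurd e.symm hx
          | inr m => exact m)
        exact ⟨x :: pre, suf, by rw [he]; rfl, by
          simp [hn]; exact fun e => hx e.symm⟩

theorem pvSliceTake (xs : List String) (n : Nat) :
    PySem.List.slice xs none (some (n : Int)) = xs.take n := by
  rw [PySem.List.slice_to xs (by positivity : (0:Int) ≤ (n:Int))]; norm_num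

theorem pvSliceDrop (xs : List String) (n : Nat) :
    PySem.List.slice xs (some ((n : Int) + 1)) none = xs.drop (n + 1) := by
  rw [PySem.List.slice_from xs (by positivity : (0:Int) ≤ (n:Int) + 1)]; norm_num

-- ===== VERDICT (by name: the statement is the Claim_ definition above) =====
theorem read_content_into_rules_and_strings_spec : Claim_equal_read_content_into_rules_and_strings := by
  intro lines _ _
  unfold Spec_read_content_into_rules_and_strings
  unfold read_content_into_rules_and_strings read_content_into_rules_and_strings_alt
  by_cases hm : "" ∈ lines
  · obtain ⟨pre, suf, he, hpre⟩ := pvFirstMem "" lines hm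
    subst he
    have hidx : PySem.List.index? (pre ++ "" :: suf) "" = some pre.length := by
      rw [PySem.List.index?_eq_some_iff]; exact ⟨pre, suf, rfl, rfl, hpre⟩
    rw [hidx]
    simp only [Option.getD_some, pvSliceTake, pvSliceDrop]
    rw [List.foldl_append, pvFoldA_rules pre hpre, List.foldl_cons,
      pvStepA_false, if_pos rfl, pvFoldA_done]
    have htake : (pre ++ "" :: suf).take pre.length = pre := List.take_left
    have hdrop : (pre ++ "" :: suf).drop (pre.length + 1) = suf := by
      rw [← List.drop_drop, List.drop_left]; rfl
    rw [htake, hdrop]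
    rfl
  · have hidx : PySem.List.index? lines "" = none :=
      (PySem.List.index?_eq_none_iff _ _).mpr hm
    rw [hidx]
    simp only [Option.getD_none, pvSliceTake, pvSliceDrop]
    rw [pvFoldA_rules lines hm, List.take_length, List.drop_eq_nil_of_le (by omega)]
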